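-- pv_equiv track=rewrite | github.com/SeongHyeon-Yun/Progarmmers | 프로그래머스/unrated/134240. 푸드 파이트 대회/푸드 파이트 대회.py | solution
-- ===== SOURCE A (Python) =====
-- def solution(food):
--     answer = ''
--     reverse_str = ''
--     for index, value in enumerate(food):
--         answer += str(index) * (value // 2)
--
--     for i in answer:
--         reverse_str = i + reverse_str
--
--
--     answer = answer+ '0' +reverse_str
--
--     return answer
-- ===== SOURCE B (Python) =====
-- def solution(food):
--     left_parts = []
--     right_parts = []
--     for index, value in enumerate(food):
--         block = str(index) * (value // 2)
--         left_parts.append(block)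
--         right_parts.append(block[::-1])
--     right_parts.reverse()
--     return ''.join(left_parts) + '0' + ''.join(right_parts)
-- ===== Notes on version B (the rewrite author's own statement) =====
-- stated objective: faster
-- what changed: Single pass over food maintaining two symmetric accumulators (appending each block left, prepending its reversal right) instead of building the left half and then reversing it by prepending one character at a time in a second loop over the built string.
import Mathlib
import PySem

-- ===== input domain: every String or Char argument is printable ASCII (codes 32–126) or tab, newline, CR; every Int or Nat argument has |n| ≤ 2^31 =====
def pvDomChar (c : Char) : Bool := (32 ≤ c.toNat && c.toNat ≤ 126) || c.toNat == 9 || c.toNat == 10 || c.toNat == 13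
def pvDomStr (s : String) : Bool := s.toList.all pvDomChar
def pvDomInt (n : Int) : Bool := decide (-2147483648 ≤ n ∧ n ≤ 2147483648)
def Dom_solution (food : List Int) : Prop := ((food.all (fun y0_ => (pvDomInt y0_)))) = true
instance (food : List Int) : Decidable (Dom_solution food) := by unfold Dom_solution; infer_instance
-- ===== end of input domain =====

-- ===== PORT A =====
-- str(index) * (value // 2) as a character block (shared literal step of both ports)
def pvBlk (i v : Int) : List Char :=
  PySem.List.pyRepeat (PySem.Int.toChars i) (PySem.Int.floordiv v 2)

def solution (food : List Int) : String :=
  let answer : List Char :=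
    (PySem.List.enumerate food 0).foldl (fun acc p => acc ++ pvBlk p.1 p.2) []
  let reverse_str : List Char :=
    answer.foldl (fun r i => i :: r) []
  String.ofList (answer ++ '0' :: reverse_str)

-- ===== PORT B =====
-- one pass over enumerate(food) collecting left blocks and reversed right blocks; join once at the end
def solution_alt (food : List Int) : String :=
  let st : List (List Char) × List (List Char) :=
    (PySem.List.enumerate food 0).foldl
      (fun acc p =>
        let block := pvBlk p.1 p.2
        (acc.1 ++ [block], acc.2 ++ [block.reverse])) ([], [])
  String.ofList (st.1.flatten ++ '0' :: st.2.reverse.flatten)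

-- ===== PRECONDITION & SPEC =====
def Spec_solution (food : List Int) (out : String) : Prop := out = solution_alt food
instance (food : List Int) (out : String) : Decidable (Spec_solution food out) := by unfold Spec_solution; infer_instance

-- ===== CLAIM (what is proved, stated in full; the proofs are below) =====
def Claim_equal_solution : Prop := ∀ (food : List Int), Dom_solution food → Spec_solution food (solution food)

-- ===== LEMMAS AND PROOFS =====

theorem foldl_flip_cons (l r : List Char) :
    l.foldl (fun r i => i :: r) r = l.reverse ++ r := by
  induction l generalizing r with
  | nil => simp
  | cons x xs ih => simp [List.foldl_cons, ih]

theorem pairfold_eq (l : List (Int × Int)) (a b : List (List Char)) :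
    l.foldl (fun (acc : List (List Char) × List (List Char)) p =>
        (acc.1 ++ [pvBlk p.1 p.2], acc.2 ++ [(pvBlk p.1 p.2).reverse])) (a, b)
    = (a ++ l.map (fun p => pvBlk p.1 p.2),
       b ++ l.map (fun p => (pvBlk p.1 p.2).reverse)) := by
  induction l generalizing a b with
  | nil => simp
  | cons x xs ih => simp [List.foldl_cons, ih]

theorem foldl_app (l : List (Int × Int)) (a : List Char) :
    l.foldl (fun acc p => acc ++ pvBlk p.1 p.2) a
      = a ++ ((l.map (fun p => pvBlk p.1 p.2)).flatten) := by
  induction l generalizing a with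
  | nil => simp
  | cons x xs ih => simp [List.foldl_cons, ih]

-- ===== VERDICT (by name: the statement is the Claim_ definition above) =====
theorem solution_spec : Claim_equal_solution := by
  intro food _
  unfold Spec_solution solution solution_alt
  simp only [pairfold_eq, foldl_flip_cons, foldl_app, List.nil_append, List.append_nil]
  rw [List.reverse_flatten]
  simp [Function.comp_def]
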